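-- pv_equiv track=rewrite | github.com/itzTiru/learnLinkAI-internal-server | Fast-Api/main.py | split_by_topics
-- ===== SOURCE A (Python) =====
-- def split_by_topics(text: str) -> list:
--     """
--     Improved topic splitter: detects headers as lines in ALL CAPS or surrounded by blank lines.
--     Returns a list of (topic, section_text).
--     """
--     lines = text.splitlines()
--     sections = []
--     current_topic = None
--     current_section = []
--     for i, line in enumerate(lines):
--         stripped = line.strip()
--         # Detect topic: all caps and longer than 3 chars, or surrounded by blank lines
--         is_topic = (
--             (stripped.isupper() and len(stripped) > 3) or
--             (stripped and (i == 0 or not lines[i-1].strip()) and (i+1 == len(lines) or not lines[i+1].strip()))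
--         )
--         if is_topic:
--             if current_topic and current_section:
--                 sections.append((current_topic, "\n".join(current_section).strip()))
--                 current_section = []
--             current_topic = stripped
--         else:
--             current_section.append(line)
--     if current_topic and current_section:
--         sections.append((current_topic, "\n".join(current_section).strip()))
--     return sections
-- ===== SOURCE B (Python) =====
-- def split_by_topics(text: str) -> list:
--     """Index-then-segment re-implementation: find all header line indices first,
--     then emit one (topic, section) pair per gap between consecutive headers."""
--     lines = text.splitlines()
--     n = len(lines)
--
--     def is_topic(i):
--         s = lines[i].strip()
--         return (s.isupper() and len(s) > 3) or (
--             s and (i == 0 or not lines[i - 1].strip())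
--               and (i + 1 == n or not lines[i + 1].strip())
--         )
--
--     heads = [i for i in range(n) if is_topic(i)]
--     if not heads:
--         return []
--     sections = []
--     pending = lines[:heads[0]]  # lines before the first header are carried into its section
--     for k, h in enumerate(heads):
--         nxt = heads[k + 1] if k + 1 < len(heads) else n
--         seg = pending + lines[h + 1:nxt]
--         pending = []
--         if seg:
--             sections.append((lines[h].strip(), "\n".join(seg).strip()))
--     return sections
-- ===== Notes on version B (the rewrite author's own statement) =====
-- stated objective: alternative
-- what changed: Replaces A's single-pass accumulator state machine (current_topic/current_section mutated per line) with a two-pass index-then-segment traversal: first collect all header line indices, then emit one (topic, section) pair per slice between consecutive header indices, carrying the pre-first-header prefix into the first emitted section.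
import Mathlib
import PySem

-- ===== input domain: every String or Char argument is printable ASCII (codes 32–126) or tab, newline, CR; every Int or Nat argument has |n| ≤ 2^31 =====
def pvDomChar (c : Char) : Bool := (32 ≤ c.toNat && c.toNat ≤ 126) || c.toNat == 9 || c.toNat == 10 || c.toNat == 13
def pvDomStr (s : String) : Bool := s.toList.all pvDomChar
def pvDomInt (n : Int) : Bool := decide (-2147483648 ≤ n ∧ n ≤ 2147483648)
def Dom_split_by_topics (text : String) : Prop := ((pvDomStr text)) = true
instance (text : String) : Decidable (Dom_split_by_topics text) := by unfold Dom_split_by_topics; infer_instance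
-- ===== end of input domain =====

-- B replaces A's per-line accumulator state machine by a two-pass header-index/segment traversal (alternative decomposition, same cost).

-- ===== PORT A =====
-- s.isupper() ported by hand (exact on the ASCII domain, where the cased characters are
-- exactly the letters): no lowercase letter present and at least one uppercase letter.
def pyStrIsupper (s : String) : Bool :=
  s.toList.all (fun c => !PySem.Chars.islower c) && s.toList.any (fun c => PySem.Chars.isupper c)

-- the is_topic expression of line i (identical in both Python sources; B's is_topic helper)
def isTopicLine (ls : List String) (i : Nat) : Bool :=
  let s := PySem.Str.strip (ls.getD i "")
  (pyStrIsupper s && decide (3 < PySem.Str.len s)) ||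
    (decide (s ≠ "") &&
      (decide (i = 0) || decide (PySem.Str.strip (ls.getD (i - 1) "") = "")) &&
      (decide (i + 1 = ls.length) || decide (PySem.Str.strip (ls.getD (i + 1) "") = "")))

-- A's for-loop over enumerate(lines) with state (sections, current_topic, current_section)
def aLoop (ls : List String) (i : Nat) (secs : List (String × String))
    (ct : Option String) (cs : List String) : List (String × String) :=
  if _h : i < ls.length then
    let line := ls.getD i ""
    let s := PySem.Str.strip line
    if isTopicLine ls i then
      match ct with
      | some t =>
        if t ≠ "" ∧ cs ≠ [] then
          aLoop ls (i + 1) (secs ++ [(t, PySem.Str.strip (PySem.Str.join "\n" cs))]) (some s) []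
        else
          aLoop ls (i + 1) secs (some s) cs
      | none => aLoop ls (i + 1) secs (some s) cs
    else
      aLoop ls (i + 1) secs ct (cs ++ [line])
  else
    match ct with
    | some t =>
      if t ≠ "" ∧ cs ≠ [] then secs ++ [(t, PySem.Str.strip (PySem.Str.join "\n" cs))] else secs
    | none => secs
termination_by ls.length - i

def split_by_topics (text : String) : List (String × String) :=
  aLoop (PySem.Str.splitlines text) 0 [] none []

-- ===== PORT B =====
-- B's for-loop over the header-index list: seg = pending + lines[h+1:nxt], emit if non-empty
def bLoop (ls : List String) (pending : List String) : List Nat → List (String × String)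
  | [] => []
  | h :: rest =>
    let nxt : Nat := match rest with | [] => ls.length | h2 :: _ => h2
    let seg := pending ++ (ls.drop (h + 1)).take (nxt - (h + 1))
    if seg ≠ [] then
      (PySem.Str.strip (ls.getD h ""), PySem.Str.strip (PySem.Str.join "\n" seg)) :: bLoop ls [] rest
    else
      bLoop ls [] rest

def split_by_topics_alt (text : String) : List (String × String) :=
  let ls := PySem.Str.splitlines text
  let heads := (List.range ls.length).filter (isTopicLine ls)
  match heads with
  | [] => []
  | h0 :: _ => bLoop ls (ls.take h0) heads

-- ===== PRECONDITION & SPEC =====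
def Spec_split_by_topics (text : String) (out : List (String × String)) : Prop := out = split_by_topics_alt text
instance (text : String) (out : List (String × String)) : Decidable (Spec_split_by_topics text out) := by unfold Spec_split_by_topics; infer_instance

-- ===== CLAIM (what is proved, stated in full; the proofs are below) =====
def Claim_equal_split_by_topics : Prop := ∀ (text : String), Dom_split_by_topics text → Spec_split_by_topics text (split_by_topics text)

-- ===== LEMMAS AND PROOFS =====

-- headers from index i on
def hf (ls : List String) (i : Nat) : List Nat :=
  (List.range' i (ls.length - i)).filter (isTopicLine ls)

-- the lines from index i up to (excluding) index j
def segf (ls : List String) (i j : Nat) : List String := (ls.drop i).take (j - i)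

-- one emitted section
def emit (t : String) (cs : List String) : List (String × String) :=
  if cs ≠ [] then [(t, PySem.Str.strip (PySem.Str.join "\n" cs))] else []

-- what aLoop computes from index i with topic t and accumulator cs, as a function of hf ls i
def charK (ls : List String) (secs : List (String × String)) (t : String) (cs : List String)
    (i : Nat) : List Nat → List (String × String)
  | [] => secs ++ emit t (cs ++ segf ls i ls.length)
  | h :: _ =>
    aLoop ls (h + 1) (secs ++ emit t (cs ++ segf ls i h)) (some (PySem.Str.strip (ls.getD h ""))) []

-- what aLoop computes from index i with topic None, as a function of hf ls i
def initK (ls : List String) (cs : List String) (i : Nat) : List Nat → List (String × String)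
  | [] => []
  | h :: rest => bLoop ls (cs ++ segf ls i h) (h :: rest)

lemma hf_ge (ls : List String) (i : Nat) (h : ls.length ≤ i) : hf ls i = [] := by
  unfold hf
  rw [Nat.sub_eq_zero_of_le h]
  rfl

lemma hf_pos (ls : List String) (i : Nat) (hi : i < ls.length) (ht : isTopicLine ls i = true) :
    hf ls i = i :: hf ls (i + 1) := by
  unfold hf
  rw [show ls.length - i = (ls.length - (i + 1)) + 1 by omega, List.range']
  simp [ht]

lemma hf_neg (ls : List String) (i : Nat) (hi : i < ls.length) (ht : isTopicLine ls i = false) :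
    hf ls i = hf ls (i + 1) := by
  unfold hf
  rw [show ls.length - i = (ls.length - (i + 1)) + 1 by omega, List.range']
  simp [ht]

lemma hf_cons (ls : List String) (k : Nat) :
    ∀ i h rest, ls.length - i = k → hf ls i = h :: rest →
      i ≤ h ∧ h < ls.length ∧ isTopicLine ls h = true ∧ rest = hf ls (h + 1) := by
  induction k with
  | zero =>
    intro i h rest hk he
    rw [hf_ge ls i (by omega)] at he
    exact absurd he (by simp)
  | succ k ih =>
    intro i h rest hk he
    have hi : i < ls.length := by omega
    cases ht : isTopicLine ls i with
    | true =>
      rw [hf_pos ls i hi ht] at he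
      obtain ⟨rfl, rfl⟩ := List.cons.injEq .. ▸ he
      exact ⟨le_refl _, hi, ht, rfl⟩
    | false =>
      rw [hf_neg ls i hi ht] at he
      obtain ⟨h1, h2, h3, h4⟩ := ih (i + 1) h rest (by omega) he
      exact ⟨by omega, h2, h3, h4⟩

lemma segf_nil (ls : List String) (i j : Nat) (h : j ≤ i) : segf ls i j = [] := by
  unfold segf
  rw [Nat.sub_eq_zero_of_le h, List.take_zero]

lemma segf_nil' (ls : List String) (i j : Nat) (h : ls.length ≤ i) : segf ls i j = [] := by
  unfold segf
  rw [List.drop_eq_nil_of_le h]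
  simp

lemma segf_cons (ls : List String) (i j : Nat) (hi : i < ls.length) (hij : i < j) :
    ls.getD i "" :: segf ls (i + 1) j = segf ls i j := by
  unfold segf
  rw [List.drop_eq_getElem_cons hi, show j - i = (j - (i + 1)) + 1 by omega, List.take_succ_cons,
    List.getD_eq_getElem ls "" hi]

lemma topic_strip_ne (ls : List String) (i : Nat) (ht : isTopicLine ls i = true) :
    PySem.Str.strip (ls.getD i "") ≠ "" := by
  intro hs
  unfold isTopicLine at ht
  rw [hs] at ht
  simp [pyStrIsupper] at ht

lemma bLoop_one (ls : List String) (p : List String) (h : Nat) :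
    bLoop ls p [h] = emit (PySem.Str.strip (ls.getD h "")) (p ++ segf ls (h + 1) ls.length) := by
  show (if p ++ segf ls (h + 1) ls.length ≠ [] then _ :: bLoop ls [] [] else bLoop ls [] []) = _
  unfold emit segf
  split_ifs <;> simp [bLoop]

lemma bLoop_cons₂ (ls : List String) (p : List String) (h h2 : Nat) (rest : List Nat) :
    bLoop ls p (h :: h2 :: rest) =
      emit (PySem.Str.strip (ls.getD h "")) (p ++ segf ls (h + 1) h2) ++ bLoop ls [] (h2 :: rest) := by
  show (if p ++ segf ls (h + 1) h2 ≠ [] then _ :: bLoop ls [] (h2 :: rest)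
        else bLoop ls [] (h2 :: rest)) = _
  unfold emit segf
  split_ifs <;> simp

lemma char (ls : List String) (k : Nat) :
    ∀ i secs t cs, ls.length - i = k → t ≠ "" →
      aLoop ls i secs (some t) cs = charK ls secs t cs i (hf ls i) := by
  induction k with
  | zero =>
    intro i secs t cs hk htne
    rw [hf_ge ls i (by omega), aLoop, dif_neg (by omega)]
    simp only [charK, segf_nil' ls i ls.length (by omega), List.append_nil]
    by_cases hcs : cs = [] <;> simp [emit, hcs, htne]
  | succ k ih =>
    intro i secs t cs hk htne
    have hi : i < ls.length := by omega
    rw [aLoop, dif_pos hi]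
    cases ht : isTopicLine ls i with
    | true =>
      rw [hf_pos ls i hi ht]
      simp only [charK, segf_nil ls i i (le_refl i), List.append_nil, if_pos]
      by_cases hcs : cs = [] <;> simp [emit, hcs, htne]
    | false =>
      simp only [Bool.false_eq_true, if_false]
      rw [ih (i + 1) secs t (cs ++ [ls.getD i ""]) (by omega) htne, hf_neg ls i hi ht]
      cases hhf : hf ls (i + 1) with
      | nil =>
        simp only [charK, List.append_assoc, List.singleton_append,
          segf_cons ls i ls.length hi hi]
      | cons h rest =>
        obtain ⟨h1, _, _, _⟩ := hf_cons ls (ls.length - (i + 1)) (i + 1) h rest rfl hhf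
        simp only [charK, List.append_assoc, List.singleton_append,
          segf_cons ls i h hi (by omega)]

lemma main (ls : List String) :
    ∀ (rest : List Nat), ∀ h secs p, h < ls.length → isTopicLine ls h = true →
      hf ls (h + 1) = rest →
      aLoop ls (h + 1) secs (some (PySem.Str.strip (ls.getD h ""))) p =
        secs ++ bLoop ls p (h :: rest) := by
  intro rest
  induction rest with
  | nil =>
    intro h secs p hh ht hhf
    rw [char ls (ls.length - (h + 1)) (h + 1) secs _ p rfl (topic_strip_ne ls h ht), hhf,
      bLoop_one]
    rfl
  | cons h2 rest' ih =>
    intro h secs p hh ht hhf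
    rw [char ls (ls.length - (h + 1)) (h + 1) secs _ p rfl (topic_strip_ne ls h ht), hhf]
    obtain ⟨hle, hh2, ht2, hrest⟩ := hf_cons ls (ls.length - (h + 1)) (h + 1) h2 rest' rfl hhf
    show aLoop ls (h2 + 1) _ (some (PySem.Str.strip (ls.getD h2 ""))) [] = _
    rw [ih h2 _ [] hh2 ht2 hrest.symm, bLoop_cons₂, List.append_assoc]

lemma init (ls : List String) (k : Nat) :
    ∀ i secs cs, ls.length - i = k →
      aLoop ls i secs none cs = secs ++ initK ls cs i (hf ls i) := by
  induction k with
  | zero =>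
    intro i secs cs hk
    rw [hf_ge ls i (by omega), aLoop, dif_neg (by omega)]
    simp [initK]
  | succ k ih =>
    intro i secs cs hk
    have hi : i < ls.length := by omega
    rw [aLoop, dif_pos hi]
    cases ht : isTopicLine ls i with
    | true =>
      simp only [if_pos]
      rw [hf_pos ls i hi ht, main ls (hf ls (i + 1)) i secs cs hi ht rfl]
      simp only [initK, segf_nil ls i i (le_refl i), List.append_nil]
    | false =>
      simp only [Bool.false_eq_true, if_false]
      rw [ih (i + 1) secs (cs ++ [ls.getD i ""]) (by omega), hf_neg ls i hi ht]
      cases hhf : hf ls (i + 1) with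
      | nil => rfl
      | cons h rest =>
        obtain ⟨h1, _, _, _⟩ := hf_cons ls (ls.length - (i + 1)) (i + 1) h rest rfl hhf
        simp only [initK, List.append_assoc, List.singleton_append,
          segf_cons ls i h hi (by omega)]

lemma hf_zero (ls : List String) : hf ls 0 = (List.range ls.length).filter (isTopicLine ls) := by
  unfold hf
  rw [Nat.sub_zero, ← List.range_eq_range']

-- ===== VERDICT (by name: the statement is the Claim_ definition above) =====
theorem split_by_topics_spec : Claim_equal_split_by_topics := by
  intro text _
  unfold Spec_split_by_topics split_by_topics split_by_topics_alt
  rw [init (PySem.Str.splitlines text) (PySem.Str.splitlines text).length 0 [] [] rfl]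
  simp only [← hf_zero, List.nil_append]
  cases hhf : hf (PySem.Str.splitlines text) 0 with
  | nil => rfl
  | cons h rest =>
    simp only [initK, List.nil_append]
    rw [show segf (PySem.Str.splitlines text) 0 h = (PySem.Str.splitlines text).take h from by
      unfold segf; simp]
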